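-- pv_equiv track=rewrite | github.com/huanghhappy/duty-roster | app.py | calculate_scenario_and_quotas
-- ===== SOURCE A (Python) =====
-- def calculate_standard_8_person_shifts(residents_data, num_days):
--     r3s = sorted([r for r in residents_data if r['rank'] == 'R3'], key=lambda x: x['name'])
--     r4s = sorted([r for r in residents_data if r['rank'] == 'R4'], key=lambda x: x['name'])
--     r5s = sorted([r for r in residents_data if r['rank'] == 'R5'], key=lambda x: x['name'])
--     r6s = sorted([r for r in residents_data if r['rank'] == 'R6'], key=lambda x: x['name'])
--
--     quotas = {r['name']: 0 for r in residents_data}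
--     line1_pool = r3s + r4s
--     line2_pool = r5s + r6s
--
--     def distribute_shifts(pool, total_slots):
--         if not pool: return
--         n = len(pool)
--         base_shifts = total_slots // n
--         remainder = total_slots % n
--         for i, r in enumerate(pool):
--             extra = 1 if i < remainder else 0
--             quotas[r['name']] = base_shifts + extra
--
--     distribute_shifts(line1_pool, num_days)
--     distribute_shifts(line2_pool, num_days)
--     return quotas
--
-- def calculate_scenario_and_quotas(residents_data, num_days):
--     MAX_SHIFTS = 8
--     total_slots_needed_for_double = num_days * 2
--
--     r6s = [r for r in residents_data if r['rank'] == 'R6']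
--     r5s = [r for r in residents_data if r['rank'] == 'R5']
--     r4s = [r for r in residents_data if r['rank'] == 'R4']
--     r3s = [r for r in residents_data if r['rank'] == 'R3']
--
--     is_standard_8 = (len(r6s)==2 and len(r5s)==2 and len(r4s)==2 and len(r3s)==2)
--
--     strict_mode = False
--     quotas = {}
--     target_double_count = num_days
--     mode = ""
--
--     if is_standard_8:
--         mode = "Standard 8-Person (Strict Line Separation)"
--         strict_mode = True
--         target_double_count = num_days
--         quotas = calculate_standard_8_person_shifts(residents_data, num_days)
--     else:
--         total_supply = len(residents_data) * MAX_SHIFTS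
--         quotas = {r['name']: MAX_SHIFTS for r in residents_data}
--
--         if total_supply >= total_slots_needed_for_double:
--             mode = "Scenario A (Surplus)"
--             excess = total_supply - total_slots_needed_for_double
--             reduce_order = r6s + r5s + r4s + r3s
--             while excess > 0:
--                 reduced = False
--                 for r in reduce_order:
--                     name = r['name']
--                     if quotas[name] > 7 and excess > 0:
--                         quotas[name] -= 1
--                         excess -= 1
--                         reduced = True
--                 if not reduced: break
--             target_double_count = num_days
--         else:
--             mode = "Scenario B/C (Shortage)"
--             senior_role_demand = num_days
--             senior_supply = (len(r5s) + len(r6s)) * MAX_SHIFTS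
--             senior_deficit = max(0, senior_role_demand - senior_supply)
--             r4_total = len(r4s) * MAX_SHIFTS
--             r4_for_line1 = max(0, r4_total - senior_deficit)
--             r3_total = len(r3s) * MAX_SHIFTS
--             total_line1_capacity = r3_total + r4_for_line1
--             target_double_count = min(num_days, total_line1_capacity)
--
--     return quotas, target_double_count, mode, strict_mode
-- ===== SOURCE B (Python) =====
-- def calculate_standard_8_person_shifts(residents_data, num_days):
--     r3s = sorted([r for r in residents_data if r['rank'] == 'R3'], key=lambda x: x['name'])
--     r4s = sorted([r for r in residents_data if r['rank'] == 'R4'], key=lambda x: x['name'])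
--     r5s = sorted([r for r in residents_data if r['rank'] == 'R5'], key=lambda x: x['name'])
--     r6s = sorted([r for r in residents_data if r['rank'] == 'R6'], key=lambda x: x['name'])
--
--     quotas = {r['name']: 0 for r in residents_data}
--     line1_pool = r3s + r4s
--     line2_pool = r5s + r6s
--
--     def distribute_shifts(pool, total_slots):
--         if not pool: return
--         n = len(pool)
--         base_shifts = total_slots // n
--         remainder = total_slots % n
--         for i, r in enumerate(pool):
--             extra = 1 if i < remainder else 0
--             quotas[r['name']] = base_shifts + extra
--
--     distribute_shifts(line1_pool, num_days)
--     distribute_shifts(line2_pool, num_days)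
--     return quotas
--
--
-- def calculate_scenario_and_quotas(residents_data, num_days):
--     # one counting pass over the ranks instead of four filter scans
--     counts = {}
--     for r in residents_data:
--         counts[r['rank']] = counts.get(r['rank'], 0) + 1
--     c3 = counts.get('R3', 0)
--     c4 = counts.get('R4', 0)
--     c5 = counts.get('R5', 0)
--     c6 = counts.get('R6', 0)
--
--     if c3 == 2 and c4 == 2 and c5 == 2 and c6 == 2:
--         return (calculate_standard_8_person_shifts(residents_data, num_days),
--                 num_days, "Standard 8-Person (Strict Line Separation)", True)
--
--     total_supply = len(residents_data) * 8
--
--     if total_supply >= num_days * 2: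
--         # closed form: the first `excess` distinct names, taken in rank order
--         # R6, R5, R4, R3 (input order within a rank), get 7; everyone else 8.
--         excess = total_supply - num_days * 2
--         reduced = set()
--         for rank in ('R6', 'R5', 'R4', 'R3'):
--             for r in residents_data:
--                 if r['rank'] == rank and len(reduced) < excess:
--                     reduced.add(r['name'])
--         quotas = {r['name']: (7 if r['name'] in reduced else 8) for r in residents_data}
--         return quotas, num_days, "Scenario A (Surplus)", False
--
--     quotas = {r['name']: 8 for r in residents_data}
--     senior_deficit = max(0, num_days - (c5 + c6) * 8)
--     r4_for_line1 = max(0, c4 * 8 - senior_deficit)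
--     return quotas, min(num_days, c3 * 8 + r4_for_line1), "Scenario B/C (Shortage)", False
-- ===== Notes on version B (the rewrite author's own statement) =====
-- stated objective: alternative
-- what changed: B replaces A's four per-rank filter scans with one rank-counting dict and replaces A's fixed-point `while excess > 0` decrement loop (with its `reduced` flag) by first computing the set of the first `excess` distinct names in reduce order and then building the final quota dict directly from that set.
import Mathlib
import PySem

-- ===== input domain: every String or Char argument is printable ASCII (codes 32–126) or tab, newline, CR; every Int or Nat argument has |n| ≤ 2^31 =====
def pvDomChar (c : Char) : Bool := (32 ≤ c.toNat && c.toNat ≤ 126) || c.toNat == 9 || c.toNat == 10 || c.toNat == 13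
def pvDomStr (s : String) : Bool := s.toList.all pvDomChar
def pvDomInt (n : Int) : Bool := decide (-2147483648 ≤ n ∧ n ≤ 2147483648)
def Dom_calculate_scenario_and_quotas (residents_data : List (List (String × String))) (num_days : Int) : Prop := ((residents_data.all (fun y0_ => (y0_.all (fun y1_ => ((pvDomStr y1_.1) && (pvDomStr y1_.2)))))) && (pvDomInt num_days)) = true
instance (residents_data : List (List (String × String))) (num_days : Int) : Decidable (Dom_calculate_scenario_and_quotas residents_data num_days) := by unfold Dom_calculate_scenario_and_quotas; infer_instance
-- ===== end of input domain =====

-- B replaces A's four filter scans by one rank-counting dict, and A's fixed-point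
-- `while excess > 0` decrement loop by computing the set of reduced names first and
-- building the final quota dict directly from it (objective: alternative decomposition).

-- ===== PORT A =====
-- r['rank'] / r['name'] (KeyError when absent → excluded by Pre_; getD "" is the totalisation)
def pvRank (r : List (String × String)) : String := (PySem.Dict.mk r).getD "rank" ""
def pvName (r : List (String × String)) : String := (PySem.Dict.mk r).getD "name" ""

-- inner helper distribute_shifts of calculate_standard_8_person_shifts (mutates quotas → returns it)
def pvDistribute (quotas : PySem.Dict String Int) (pool : List (List (String × String))) (total_slots : Int) : PySem.Dict String Int :=
  if pool.isEmpty then quotas else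
  let n : Int := pool.length
  let base_shifts := PySem.Int.floordiv total_slots n
  let remainder := PySem.Int.mod total_slots n
  (PySem.List.enumerate pool).foldl
    (fun d ir => d.insert (pvName ir.2) (base_shifts + (if ir.1 < remainder then 1 else 0)))
    quotas

-- calculate_standard_8_person_shifts (module helper, used verbatim by both Pythons)
def pvStd8 (residents_data : List (List (String × String))) (num_days : Int) : PySem.Dict String Int :=
  let r3s := PySem.List.sorted (residents_data.filter (fun r => pvRank r == "R3")) (fun x => pvName x) false
  let r4s := PySem.List.sorted (residents_data.filter (fun r => pvRank r == "R4")) (fun x => pvName x) false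
  let r5s := PySem.List.sorted (residents_data.filter (fun r => pvRank r == "R5")) (fun x => pvName x) false
  let r6s := PySem.List.sorted (residents_data.filter (fun r => pvRank r == "R6")) (fun x => pvName x) false
  let quotas := residents_data.foldl (fun d r => d.insert (pvName r) (0 : Int)) PySem.Dict.empty
  let q1 := pvDistribute quotas (r3s ++ r4s) num_days
  pvDistribute q1 (r5s ++ r6s) num_days

-- one iteration of the body of A's `for r in reduce_order` inner loop (state: quotas, excess, reduced)
def pvStepA (st : PySem.Dict String Int × Int × Bool) (r : List (String × String)) : PySem.Dict String Int × Int × Bool :=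
  let name := pvName r
  if st.1.getD name 0 > 7 ∧ st.2.1 > 0 then
    (st.1.insert name (st.1.getD name 0 - 1), st.2.1 - 1, true)
  else st

-- one full pass of the inner `for` loop (reduced starts False each pass)
def pvPassA (order : List (List (String × String))) (q : PySem.Dict String Int) (e : Int) : PySem.Dict String Int × Int × Bool :=
  order.foldl pvStepA (q, e, false)

-- termination helper for the while loop: a pass never increases excess, and strictly decreases it when it reduced
theorem pvFoldA_excess (l : List (List (String × String))) (q : PySem.Dict String Int) (e : Int) (red : Bool) :
    (l.foldl pvStepA (q, e, red)).2.1 ≤ e ∧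
    ((l.foldl pvStepA (q, e, red)).2.2 = true → red = true ∨ (l.foldl pvStepA (q, e, red)).2.1 < e) := by
  induction l generalizing q e red with
  | nil => exact ⟨le_refl e, fun h => Or.inl h⟩
  | cons r t ih =>
    simp only [List.foldl_cons, pvStepA]
    split
    · rcases ih (q.insert (pvName r) (q.getD (pvName r) 0 - 1)) (e - 1) true with ⟨h1, _⟩
      exact ⟨by omega, fun _ => Or.inr (by omega)⟩
    · exact ih q e red

-- A's `while excess > 0: … if not reduced: break`
def pvLoopA (order : List (List (String × String))) (q : PySem.Dict String Int) (e : Int) : PySem.Dict String Int × Int :=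
  if h : e > 0 then
    let st := pvPassA order q e
    if hr : st.2.2 then pvLoopA order st.1 st.2.1 else (st.1, st.2.1)
  else (q, e)
termination_by e.toNat
decreasing_by
  have h12 := pvFoldA_excess order q e false
  have h2 := h12.2 (by simpa [pvPassA] using hr)
  have h3 : (pvPassA order q e).2.1 = (order.foldl pvStepA (q, e, false)).2.1 := rfl
  rw [h3]
  rcases h2 with hc | hlt
  · simp at hc
  · omega

def calculate_scenario_and_quotas (residents_data : List (List (String × String))) (num_days : Int) : (List (String × Int)) × Int × String × Bool :=
  let total_slots_needed_for_double := num_days * 2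
  let r6s := residents_data.filter (fun r => pvRank r == "R6")
  let r5s := residents_data.filter (fun r => pvRank r == "R5")
  let r4s := residents_data.filter (fun r => pvRank r == "R4")
  let r3s := residents_data.filter (fun r => pvRank r == "R3")
  let is_standard_8 := r6s.length == 2 && r5s.length == 2 && r4s.length == 2 && r3s.length == 2
  if is_standard_8 then
    ((pvStd8 residents_data num_days).items, num_days, "Standard 8-Person (Strict Line Separation)", true)
  else
    let total_supply : Int := (residents_data.length : Int) * 8
    let quotas := residents_data.foldl (fun d r => d.insert (pvName r) (8 : Int)) PySem.Dict.empty
    if total_supply ≥ total_slots_needed_for_double then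
      let st := pvLoopA (r6s ++ r5s ++ r4s ++ r3s) quotas (total_supply - total_slots_needed_for_double)
      (st.1.items, num_days, "Scenario A (Surplus)", false)
    else
      let senior_deficit := max 0 (num_days - ((r5s.length : Int) + (r6s.length : Int)) * 8)
      let r4_for_line1 := max 0 ((r4s.length : Int) * 8 - senior_deficit)
      let total_line1_capacity := (r3s.length : Int) * 8 + r4_for_line1
      (quotas.items, min num_days total_line1_capacity, "Scenario B/C (Shortage)", false)

-- ===== PORT B =====
-- counts[r['rank']] = counts.get(r['rank'], 0) + 1
def pvCountStep (d : PySem.Dict String Int) (r : List (String × String)) : PySem.Dict String Int :=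
  d.insert (pvRank r) (d.getD (pvRank r) 0 + 1)

-- body of `if r['rank'] == rank and len(reduced) < excess: reduced.add(r['name'])`
def pvReduceStep (excess : Int) (rk : String) (s : PySem.Set String) (r : List (String × String)) : PySem.Set String :=
  if pvRank r == rk && decide (PySem.Set.len s < excess) then s.add (pvName r) else s

def calculate_scenario_and_quotas_alt (residents_data : List (List (String × String))) (num_days : Int) : (List (String × Int)) × Int × String × Bool :=
  let counts := residents_data.foldl pvCountStep PySem.Dict.empty
  let c3 := counts.getD "R3" 0
  let c4 := counts.getD "R4" 0
  let c5 := counts.getD "R5" 0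
  let c6 := counts.getD "R6" 0
  if c3 == 2 && c4 == 2 && c5 == 2 && c6 == 2 then
    ((pvStd8 residents_data num_days).items, num_days, "Standard 8-Person (Strict Line Separation)", true)
  else
    let total_supply : Int := (residents_data.length : Int) * 8
    if total_supply ≥ num_days * 2 then
      let excess := total_supply - num_days * 2
      let reduced := ["R6", "R5", "R4", "R3"].foldl (fun s rk => residents_data.foldl (pvReduceStep excess rk) s) PySem.Set.empty
      let quotas := residents_data.foldl (fun d r => d.insert (pvName r) (if PySem.Set.contains reduced (pvName r) then (7 : Int) else 8)) PySem.Dict.empty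
      (quotas.items, num_days, "Scenario A (Surplus)", false)
    else
      let quotas := residents_data.foldl (fun d r => d.insert (pvName r) (8 : Int)) PySem.Dict.empty
      let senior_deficit := max 0 (num_days - (c5 + c6) * 8)
      let r4_for_line1 := max 0 (c4 * 8 - senior_deficit)
      (quotas.items, min num_days (c3 * 8 + r4_for_line1), "Scenario B/C (Shortage)", false)

-- ===== PRECONDITION & SPEC =====
-- Pre_ excludes exactly the inputs where the Python A raises KeyError: a resident dict missing 'rank' or 'name'.
def Pre_calculate_scenario_and_quotas (residents_data : List (List (String × String))) (num_days : Int) : Prop :=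
  ∀ r ∈ residents_data, (PySem.Dict.mk r).contains "rank" = true ∧ (PySem.Dict.mk r).contains "name" = true
instance (residents_data : List (List (String × String))) (num_days : Int) : Decidable (Pre_calculate_scenario_and_quotas residents_data num_days) := by unfold Pre_calculate_scenario_and_quotas; infer_instance

def pvWitness_calculate_scenario_and_quotas : (List (List (String × String))) × Int :=
  ([[("rank", "R6"), ("name", "ann")], [("rank", "R3"), ("name", "bob")]], 5)

def Spec_calculate_scenario_and_quotas (residents_data : List (List (String × String))) (num_days : Int) (out : (List (String × Int)) × Int × String × Bool) : Prop := out = calculate_scenario_and_quotas_alt residents_data num_days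
instance (residents_data : List (List (String × String))) (num_days : Int) (out : (List (String × Int)) × Int × String × Bool) : Decidable (Spec_calculate_scenario_and_quotas residents_data num_days out) := by unfold Spec_calculate_scenario_and_quotas; infer_instance

-- ===== CLAIM (what is proved, stated in full; the proofs are below) =====
def Claim_equal_calculate_scenario_and_quotas : Prop := ∀ (residents_data : List (List (String × String))) (num_days : Int), Dom_calculate_scenario_and_quotas residents_data num_days → Pre_calculate_scenario_and_quotas residents_data num_days → Spec_calculate_scenario_and_quotas residents_data num_days (calculate_scenario_and_quotas residents_data num_days)

-- ===== LEMMAS AND PROOFS =====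

-- proof-only abstraction of one step of A's inner pass with the `reduced` flag dropped
def pvStepB (st : PySem.Dict String Int × Int) (r : List (String × String)) : PySem.Dict String Int × Int :=
  let name := pvName r
  if st.2 > 0 ∧ st.1.getD name 0 = 8 then (st.1.insert name (8 - 1), st.2 - 1)
  else st

-- proof-only: B's set step once the rank filter has been commuted out
def pvSetStepP (e : Int) (s : PySem.Set String) (r : List (String × String)) : PySem.Set String :=
  if decide (PySem.Set.len s < e) then s.add (pvName r) else s

-- all values of the initial all-8 quota dict are ≤ 8
theorem pvInit8 (l : List (List (String × String))) (d : PySem.Dict String Int)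
    (h : ∀ n, d.getD n 0 ≤ 8) :
    ∀ n, (l.foldl (fun d r => d.insert (pvName r) (8 : Int)) d).getD n 0 ≤ 8 := by
  induction l generalizing d with
  | nil => exact h
  | cons r t ih =>
    refine ih _ (fun n => ?_)
    rw [PySem.Dict.getD_insert]
    split
    · omega
    · exact h n

-- invariants of one A-pass: values stay ≤ 8, ≤ 7 is preserved, and if excess is still
-- positive afterwards every name in the processed list has been brought down to ≤ 7
theorem pvFoldA_inv (l : List (List (String × String))) (q : PySem.Dict String Int) (e : Int) (red : Bool)
    (h8 : ∀ n, q.getD n 0 ≤ 8) :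
    (∀ n, (l.foldl pvStepA (q, e, red)).1.getD n 0 ≤ 8) ∧
    (∀ n, q.getD n 0 ≤ 7 → (l.foldl pvStepA (q, e, red)).1.getD n 0 ≤ 7) ∧
    ((l.foldl pvStepA (q, e, red)).2.1 > 0 → ∀ r ∈ l, (l.foldl pvStepA (q, e, red)).1.getD (pvName r) 0 ≤ 7) := by
  induction l generalizing q e red with
  | nil => exact ⟨h8, fun _ h => h, fun _ r hr => absurd hr (List.not_mem_nil)⟩
  | cons r t ih =>
    simp only [List.foldl_cons, pvStepA]
    split
    · rename_i hg
      have h8' : ∀ n, (q.insert (pvName r) (q.getD (pvName r) 0 - 1)).getD n 0 ≤ 8 := by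
        intro n; rw [PySem.Dict.getD_insert]; split
        · have := h8 (pvName r); omega
        · exact h8 n
      rcases ih (q.insert (pvName r) (q.getD (pvName r) 0 - 1)) (e - 1) true h8' with ⟨i1, i2, i3⟩
      refine ⟨i1, fun n hn => i2 n ?_, fun hpos r' hr' => ?_⟩
      · rw [PySem.Dict.getD_insert]; split
        · rename_i he; rw [he] at hn; omega
        · exact hn
      · rcases List.mem_cons.mp hr' with rfl | hmem
        · refine i2 (pvName r') ?_
          rw [PySem.Dict.getD_insert_self]
          have := h8 (pvName r'); omega
        · exact i3 hpos r' hmem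
    · rename_i hg
      rcases ih q e red h8 with ⟨i1, i2, i3⟩
      refine ⟨i1, i2, fun hpos r' hr' => ?_⟩
      rcases List.mem_cons.mp hr' with rfl | hmem
      · refine i2 (pvName r') ?_
        rcases pvFoldA_excess t q e red with ⟨hle, _⟩
        by_contra hgt
        exact hg ⟨by omega, by omega⟩
      · exact i3 hpos r' hmem

-- an A-pass over quotas all ≤ 7 changes nothing
theorem pvFoldA_stable (l : List (List (String × String))) (q : PySem.Dict String Int) (e : Int) (red : Bool)
    (h7 : ∀ r ∈ l, q.getD (pvName r) 0 ≤ 7) :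
    l.foldl pvStepA (q, e, red) = (q, e, red) := by
  induction l with
  | nil => rfl
  | cons r t ih =>
    simp only [List.foldl_cons, pvStepA]
    rw [if_neg (by have := h7 r (List.mem_cons_self); intro hc; omega)]
    exact ih (fun r' hr' => h7 r' (List.mem_cons_of_mem _ hr'))

-- the quotas/excess components of an A-pass coincide with the flag-free pass
theorem pvFoldA_eq_foldB (l : List (List (String × String))) (q : PySem.Dict String Int) (e : Int) (red : Bool)
    (h8 : ∀ n, q.getD n 0 ≤ 8) :
    ((l.foldl pvStepA (q, e, red)).1, (l.foldl pvStepA (q, e, red)).2.1) = l.foldl pvStepB (q, e) := by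
  induction l generalizing q e red with
  | nil => rfl
  | cons r t ih =>
    simp only [List.foldl_cons, pvStepA, pvStepB]
    by_cases hg : q.getD (pvName r) 0 > 7 ∧ e > 0
    · have hv : q.getD (pvName r) 0 = 8 := by have := h8 (pvName r); omega
      rw [if_pos hg, if_pos ⟨hg.2, hv⟩, hv]
      exact ih _ _ true (fun n => by
        rw [PySem.Dict.getD_insert]; split
        · omega
        · exact h8 n)
    · rw [if_neg hg, if_neg (by rintro ⟨he, hv⟩; exact hg ⟨by omega, he⟩)]
      exact ih q e red h8

-- the flag-free pass with non-positive excess changes nothing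
theorem pvFoldB_nonpos (l : List (List (String × String))) (q : PySem.Dict String Int) (e : Int)
    (he : e ≤ 0) : l.foldl pvStepB (q, e) = (q, e) := by
  induction l with
  | nil => rfl
  | cons r t ih =>
    simp only [List.foldl_cons, pvStepB]
    rw [if_neg (by rintro ⟨h, _⟩; omega)]
    exact ih

-- A's while loop equals one flag-free pass (from an all-≤8 dict)
theorem pvLoopA_eq_passB (order : List (List (String × String))) (q : PySem.Dict String Int) (e : Int)
    (h8 : ∀ n, q.getD n 0 ≤ 8) :
    pvLoopA order q e = order.foldl pvStepB (q, e) := by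
  rw [pvLoopA.eq_def]
  by_cases he : e > 0
  · rw [dif_pos he]
    have heq := pvFoldA_eq_foldB order q e false h8
    rcases pvFoldA_inv order q e false h8 with ⟨i8, _, i7⟩
    simp only [pvPassA] at *
    split
    · rename_i hr
      rw [pvLoopA.eq_def]
      by_cases hp : (order.foldl pvStepA (q, e, false)).2.1 > 0
      · rw [dif_pos hp]
        have hstable := pvFoldA_stable order (order.foldl pvStepA (q, e, false)).1
          (order.foldl pvStepA (q, e, false)).2.1 false (i7 hp)
        simp only [pvPassA, hstable, ← heq]
        rw [dif_neg (by simp)]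
      · rw [dif_neg hp]
        exact heq
    · exact heq
  · rw [dif_neg he, pvFoldB_nonpos order q e (by omega)]

-- B's rank-guarded set loop is the plain set loop over the rank's filter
theorem pvReduce_filter (e : Int) (rk : String) (l : List (List (String × String))) (s : PySem.Set String) :
    l.foldl (pvReduceStep e rk) s = (l.filter (fun r => pvRank r == rk)).foldl (pvSetStepP e) s := by
  induction l generalizing s with
  | nil => rfl
  | cons r t ih =>
    simp only [List.foldl_cons, List.filter_cons, pvReduceStep]
    by_cases h : pvRank r == rk
    · simp only [h, Bool.true_and]
      rw [ih]
      rfl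
    · simp only [Bool.and_eq_true] at *
      rw [if_neg (by simp [h]), if_neg (by simpa using h)]
      exact ih s

-- counting dict: getD at a rank is the length of that rank's filter
theorem pvCounts_getD (rk : String) (l : List (List (String × String))) (d : PySem.Dict String Int) :
    (l.foldl pvCountStep d).getD rk 0 = d.getD rk 0 + ((l.filter (fun r => pvRank r == rk)).length : Int) := by
  induction l generalizing d with
  | nil => simp
  | cons r t ih =>
    simp only [List.foldl_cons, pvCountStep, List.filter_cons]
    rw [ih]
    rw [PySem.Dict.getD_insert]
    by_cases h : rk = pvRank r
    · rw [if_pos h, if_pos (by simp [h])]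
      simp [h]
      ring
    · rw [if_neg h, if_neg (by simp; intro hh; exact h hh.symm)]

-- value of the all-8 insert fold at a key
theorem pvGetD_q8 (k : String) (l : List (List (String × String))) (d : PySem.Dict String Int) :
    (l.foldl (fun d r => d.insert (pvName r) (8 : Int)) d).getD k 0 =
      if k ∈ l.map pvName then (8 : Int) else d.getD k 0 := by
  induction l generalizing d with
  | nil => simp
  | cons r t ih =>
    simp only [List.foldl_cons, List.map_cons, List.mem_cons]
    rw [ih, PySem.Dict.getD_insert]
    by_cases ht : k ∈ t.map pvName
    · simp [ht]
    · by_cases hk : k = pvName r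
      · simp [hk]
      · simp [ht, hk]

-- value of B's quota-building fold at a key
theorem pvGetD_quotasB (S : PySem.Set String) (k : String) (l : List (List (String × String))) (d : PySem.Dict String Int) :
    (l.foldl (fun d r => d.insert (pvName r) (if PySem.Set.contains S (pvName r) then (7 : Int) else 8)) d).getD k 0 =
      if k ∈ l.map pvName then (if PySem.Set.contains S k then (7 : Int) else 8) else d.getD k 0 := by
  induction l generalizing d with
  | nil => simp
  | cons r t ih =>
    simp only [List.foldl_cons, List.map_cons, List.mem_cons]
    rw [ih, PySem.Dict.getD_insert]
    by_cases ht : k ∈ t.map pvName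
    · simp [ht]
    · by_cases hk : k = pvName r
      · simp [hk]
      · simp [ht, hk]

-- the flag-free pass from a 7/8-valued dict realises the reduce set
theorem pvPassB_spec (e_tot : Int) (order : List (List (String × String))) :
    ∀ (q : PySem.Dict String Int) (S : PySem.Set String),
    (∀ r ∈ order, q.contains (pvName r) = true) →
    (∀ k, q.contains k = true → q.getD k 0 = if k ∈ S then (7 : Int) else 8) →
    S.Nodup →
    (order.foldl pvStepB (q, e_tot - PySem.Set.len S)).1.keys = q.keys ∧
    (∀ k, q.contains k = true →
      (order.foldl pvStepB (q, e_tot - PySem.Set.len S)).1.getD k 0 =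
        if k ∈ order.foldl (pvSetStepP e_tot) S then (7 : Int) else 8) := by
  induction order with
  | nil => exact fun q S _ hq _ => ⟨rfl, hq⟩
  | cons r t ih =>
    intro q S hc hq hnd
    have hcr : q.contains (pvName r) = true := hc r List.mem_cons_self
    have hct : ∀ r' ∈ t, q.contains (pvName r') = true := fun r' h => hc r' (List.mem_cons_of_mem _ h)
    simp only [List.foldl_cons]
    by_cases hS : pvName r ∈ S
    · -- already reduced: both steps are no-ops
      have hstep : pvStepB (q, e_tot - PySem.Set.len S) r = (q, e_tot - PySem.Set.len S) := by
        simp only [pvStepB]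
        rw [if_neg]
        rintro ⟨_, h8⟩
        rw [hq _ hcr, if_pos hS] at h8
        omega
      have hset : pvSetStepP e_tot S r = S := by
        simp only [pvSetStepP]
        split
        · exact PySem.Set.add_of_mem hS
        · rfl
      simp only [hstep, hset]
      exact ih q S hct hq hnd
    · by_cases hlt : PySem.Set.len S < e_tot
      · -- reduce this name: quota 8 → 7, set gains the name
        have h8 : q.getD (pvName r) 0 = 8 := by rw [hq _ hcr, if_neg hS]
        have hstep : pvStepB (q, e_tot - PySem.Set.len S) r =
            (q.insert (pvName r) 7, e_tot - PySem.Set.len S - 1) := by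
          simp only [pvStepB]
          rw [if_pos ⟨by omega, h8⟩]
          norm_num
        have hset : pvSetStepP e_tot S r = S ++ [pvName r] := by
          simp only [pvSetStepP]
          rw [if_pos (by simpa using hlt)]
          exact PySem.Set.add_of_not_mem hS
        have harg : e_tot - PySem.Set.len S - 1 = e_tot - PySem.Set.len (S ++ [pvName r]) := by
          simp only [PySem.Set.len, List.length_append, List.length_cons, List.length_nil]
          push_cast
          ring
        simp only [hstep, hset, harg]
        have hq' : ∀ k, (q.insert (pvName r) 7).contains k = true →
            (q.insert (pvName r) 7).getD k 0 = if k ∈ S ++ [pvName r] then (7 : Int) else 8 := by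
          intro k hk
          rw [PySem.Dict.getD_insert]
          by_cases hkn : k = pvName r
          · rw [if_pos hkn, if_pos (by simp [hkn])]
          · rw [if_neg hkn]
            have hqk : q.contains k = true := by
              rw [PySem.Dict.contains_insert] at hk
              simpa [hkn] using hk
            rw [hq k hqk]
            by_cases hkS : k ∈ S
            · rw [if_pos hkS, if_pos (by simp [hkS])]
            · rw [if_neg hkS, if_neg (by simp [hkS, hkn])]
        have hc' : ∀ r' ∈ t, (q.insert (pvName r) 7).contains (pvName r') = true := by
          intro r' h
          rw [PySem.Dict.contains_insert, hct r' h]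
          simp
        have hnd' : (S ++ [pvName r]).Nodup := by
          rw [← PySem.Set.add_of_not_mem hS]
          exact PySem.Set.nodup_add S (pvName r) hnd
        rcases ih (q.insert (pvName r) 7) (S ++ [pvName r]) hc' hq' hnd' with ⟨hkeys, hval⟩
        refine ⟨by rw [hkeys, PySem.Dict.keys_insert_of_contains q 7 hcr], fun k hk => ?_⟩
        refine hval k ?_
        rw [PySem.Dict.contains_insert, hk]
        simp
      · -- excess exhausted: both steps are no-ops
        have hstep : pvStepB (q, e_tot - PySem.Set.len S) r = (q, e_tot - PySem.Set.len S) := by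
          simp only [pvStepB]
          rw [if_neg]
          rintro ⟨hpos, _⟩
          omega
        have hset : pvSetStepP e_tot S r = S := by
          simp only [pvSetStepP]
          rw [if_neg (by simpa using hlt)]
        simp only [hstep, hset]
        exact ih q S hct hq hnd

-- (n : Int) == 2 is n == 2
theorem pvBeqCast (n : Nat) : (((n : Int)) == 2) = (n == 2) := by
  by_cases h : n = 2
  · subst h; rfl
  · have h1 : (((n : Int)) == 2) = false := by
      simp only [beq_eq_false_iff_ne, ne_eq]
      omega
    have h2 : (n == 2) = false := by simp [h]
    rw [h1, h2]

-- ===== VERDICT (by name: the statement is the Claim_ definition above) =====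
theorem calculate_scenario_and_quotas_spec : Claim_equal_calculate_scenario_and_quotas := by
  intro rd nd _ _
  unfold Spec_calculate_scenario_and_quotas
  unfold calculate_scenario_and_quotas calculate_scenario_and_quotas_alt
  have hc3 := pvCounts_getD "R3" rd PySem.Dict.empty
  have hc4 := pvCounts_getD "R4" rd PySem.Dict.empty
  have hc5 := pvCounts_getD "R5" rd PySem.Dict.empty
  have hc6 := pvCounts_getD "R6" rd PySem.Dict.empty
  simp only [PySem.Dict.getD_empty, zero_add] at hc3 hc4 hc5 hc6
  simp only [hc3, hc4, hc5, hc6, pvBeqCast]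
  have hcond : ((rd.filter (fun r => pvRank r == "R3")).length == 2 &&
        (rd.filter (fun r => pvRank r == "R4")).length == 2 &&
        (rd.filter (fun r => pvRank r == "R5")).length == 2 &&
        (rd.filter (fun r => pvRank r == "R6")).length == 2) =
      ((rd.filter (fun r => pvRank r == "R6")).length == 2 &&
        (rd.filter (fun r => pvRank r == "R5")).length == 2 &&
        (rd.filter (fun r => pvRank r == "R4")).length == 2 &&
        (rd.filter (fun r => pvRank r == "R3")).length == 2) := by
    cases h3 : ((rd.filter (fun r => pvRank r == "R3")).length == 2) <;>
    cases h4 : ((rd.filter (fun r => pvRank r == "R4")).length == 2) <;>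
    cases h5 : ((rd.filter (fun r => pvRank r == "R5")).length == 2) <;>
    cases h6 : ((rd.filter (fun r => pvRank r == "R6")).length == 2) <;> simp
  rw [hcond]
  split
  · rfl
  · split
    · -- Scenario A (Surplus)
      refine Prod.ext ?_ rfl
      simp only
      -- abbreviations
      set q8 := rd.foldl (fun d r => d.insert (pvName r) (8 : Int)) PySem.Dict.empty with hq8def
      set ex := (rd.length : Int) * 8 - nd * 2 with hexdef
      set order := rd.filter (fun r => pvRank r == "R6") ++ rd.filter (fun r => pvRank r == "R5") ++
        rd.filter (fun r => pvRank r == "R4") ++ rd.filter (fun r => pvRank r == "R3") with horder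
      -- A's while loop is one flag-free pass
      rw [pvLoopA_eq_passB order q8 ex (pvInit8 rd PySem.Dict.empty (by simp))]
      -- B's reduce set is the plain set fold over `order`
      have hred : (["R6", "R5", "R4", "R3"].foldl (fun s rk => rd.foldl (pvReduceStep ex rk) s) PySem.Set.empty) =
          order.foldl (pvSetStepP ex) ([] : PySem.Set String) := by
        simp only [List.foldl_cons, List.foldl_nil, horder, List.foldl_append]
        rw [pvReduce_filter, pvReduce_filter, pvReduce_filter, pvReduce_filter]
        rfl
      rw [hred]
      -- keys facts
      have hkeys8 : q8.keys = PySem.Set.ofList (rd.map pvName) := by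
        rw [hq8def, PySem.Dict.keys_foldl_insert_key rd pvName (fun _ _ => (8 : Int)) PySem.Dict.empty]
        rfl
      have hnd8 : q8.keys.Nodup :=
        PySem.Dict.nodup_keys_foldl_insert_key rd pvName _ PySem.Dict.empty (by simp)
      have hcont8 : ∀ k, q8.contains k = true ↔ k ∈ rd.map pvName := by
        intro k
        rw [PySem.Dict.contains_iff_mem_keys, hkeys8, PySem.Set.mem_ofList]
      have hc0 : ∀ r ∈ order, q8.contains (pvName r) = true := by
        intro r hr
        rw [hcont8]
        refine List.mem_map_of_mem ?_
        simp only [horder, List.mem_append, List.mem_filter] at hr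
        rcases hr with ((h | h) | h) | h <;> exact h.1
      have hq0 : ∀ k, q8.contains k = true → q8.getD k 0 = if k ∈ ([] : PySem.Set String) then (7 : Int) else 8 := by
        intro k hk
        rw [hq8def, pvGetD_q8, if_pos ((hcont8 k).mp hk)]
        simp
      have hspec := pvPassB_spec ex order q8 [] hc0 hq0 List.nodup_nil
      have hz : ex - PySem.Set.len ([] : PySem.Set String) = ex := by
        simp [PySem.Set.len]
      rw [hz] at hspec
      rcases hspec with ⟨hkeysA, hvalA⟩
      -- B's dict keys
      set S := order.foldl (pvSetStepP ex) ([] : PySem.Set String) with hSdef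
      set dB := rd.foldl (fun d r => d.insert (pvName r) (if PySem.Set.contains S (pvName r) then (7 : Int) else 8)) PySem.Dict.empty with hdBdef
      have hkeysB : dB.keys = PySem.Set.ofList (rd.map pvName) := by
        rw [hdBdef, PySem.Dict.keys_foldl_insert_key rd pvName _ PySem.Dict.empty]
        rfl
      have hndB : dB.keys.Nodup :=
        PySem.Dict.nodup_keys_foldl_insert_key rd pvName _ PySem.Dict.empty (by simp)
      set dA := (order.foldl pvStepB (q8, ex)).1 with hdAdef
      have hndA : dA.keys.Nodup := by rw [hkeysA]; exact hnd8
      rw [PySem.Dict.items_eq_map_keys dA hndA 0, PySem.Dict.items_eq_map_keys dB hndB 0]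
      rw [hkeysA, hkeysB, hkeys8]
      refine List.map_congr_left ?_
      intro k hk
      have hkm : k ∈ rd.map pvName := (PySem.Set.mem_ofList _ k).mp hk
      have hck : q8.contains k = true := (hcont8 k).mpr hkm
      rw [hvalA k hck, hdBdef, pvGetD_quotasB, if_pos hkm]
      by_cases hkS : k ∈ S
      · rw [if_pos hkS, if_pos (by simpa [PySem.Set.contains] using hkS)]
      · rw [if_neg hkS, if_neg (by simpa [PySem.Set.contains] using hkS)]
    · rfl
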